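-- pv_equiv track=rewrite | github.com/Shukti042/Simulation-and-Modeling | Assignment 1/1605042.py | px
-- ===== SOURCE A (Python) =====
-- def px(x,samples):
--     y=[0]*len(x)
--     for sample in samples:
--         if sample<=x[0]:
--             y[0]+=1
--         for index,value in enumerate(x[1:]):
--             if sample<=value and sample>x[index]:
--                 y[index+1]+=1
--     return y
-- ===== SOURCE B (Python) =====
-- def _br(a, v):
--     # bisect.bisect_right written out by hand (A imports no modules):
--     # first index i with v < a[i] in the sorted list a.
--     lo, hi = 0, len(a)
--     while lo < hi:
--         mid = (lo + hi) // 2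
--         if a[mid] <= v:
--             lo = mid + 1
--         else:
--             hi = mid
--     return lo
--
--
-- def px(x, samples):
--     # Sort the samples once; each bin count is a difference of cumulative
--     # counts obtained by binary search.  Taking the smaller of the two
--     # breakpoints for the lower bound makes the formula exact even when the
--     # breakpoints are not sorted (such a bin (x[j-1], x[j]] is empty).
--     ss = sorted(samples)
--     y = []
--     for j in range(len(x)):
--         if j == 0:
--             y.append(_br(ss, x[0]))
--         else:
--             lo = x[j - 1] if x[j - 1] < x[j] else x[j]
--             y.append(_br(ss, x[j]) - _br(ss, lo))
--     return y
-- ===== Notes on version B (the rewrite author's own statement) =====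
-- stated objective: faster
-- what changed: Instead of scanning every breakpoint pair for every sample (A), B sorts the samples once and computes each bin count as a difference of two cumulative counts obtained by hand-written bisect_right binary searches on the sorted samples.
import Mathlib
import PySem

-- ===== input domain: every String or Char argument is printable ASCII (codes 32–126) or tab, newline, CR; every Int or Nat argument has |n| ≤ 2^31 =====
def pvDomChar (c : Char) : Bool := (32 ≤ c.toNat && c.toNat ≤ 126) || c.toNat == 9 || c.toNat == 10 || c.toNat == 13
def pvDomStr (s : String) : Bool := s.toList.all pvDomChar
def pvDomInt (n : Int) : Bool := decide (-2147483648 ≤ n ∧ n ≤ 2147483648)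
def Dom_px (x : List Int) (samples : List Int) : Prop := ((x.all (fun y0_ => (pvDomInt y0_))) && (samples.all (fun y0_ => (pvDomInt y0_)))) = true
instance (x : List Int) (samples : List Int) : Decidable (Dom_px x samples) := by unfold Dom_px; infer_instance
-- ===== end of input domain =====

-- B replaces A's per-sample scan of all breakpoint pairs by sorting the samples once
-- and answering each bin with two binary searches (a difference of cumulative counts).

-- ===== PORT A =====
-- y[i] += 1  (i always in range under Pre_)
def pxInc (y : List Int) (i : Nat) : List Int := y.set i (y.getD i 0 + 1)

def px (x : List Int) (samples : List Int) : List Int :=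
  samples.foldl (fun y sample =>
    let y1 := if sample ≤ PySem.List.pyGetD x 0 0 then pxInc y 0 else y
    (PySem.List.enumerate (x.drop 1)).foldl
      (fun y2 iv =>
        if sample ≤ iv.2 ∧ PySem.List.pyGetD x iv.1 0 < sample
        then pxInc y2 (iv.1.toNat + 1) else y2) y1)
    (List.replicate x.length 0)

-- ===== PORT B =====
-- Source B's _br is bisect.bisect_right written out by hand; ported as the PySem
-- primitive PySem.List.bisectRight, which is exactly that algorithm.
def px_alt (x : List Int) (samples : List Int) : List Int :=
  let ss := PySem.List.sorted samples (fun s => s) false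
  (PySem.List.pyRange 0 x.length 1).foldl (fun y j =>
    if j = 0 then
      y ++ [(PySem.List.bisectRight ss (PySem.List.pyGetD x 0 0) : Int)]
    else
      let lo := if PySem.List.pyGetD x (j - 1) 0 < PySem.List.pyGetD x j 0
                then PySem.List.pyGetD x (j - 1) 0 else PySem.List.pyGetD x j 0
      y ++ [((PySem.List.bisectRight ss (PySem.List.pyGetD x j 0) : Int)
             - (PySem.List.bisectRight ss lo : Int))]) []

-- ===== PRECONDITION & SPEC =====
-- Pre_ excludes only x = [] with nonempty samples, where A raises IndexError at x[0].
def Pre_px (x : List Int) (samples : List Int) : Prop := x ≠ [] ∨ samples = []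
instance (x : List Int) (samples : List Int) : Decidable (Pre_px x samples) := by unfold Pre_px; infer_instance
def pvWitness_px : List Int × List Int := ([1, 3], [0, 2, 4])

def Spec_px (x : List Int) (samples : List Int) (out : List Int) : Prop := out = px_alt x samples
instance (x : List Int) (samples : List Int) (out : List Int) : Decidable (Spec_px x samples out) := by unfold Spec_px; infer_instance

-- ===== CLAIM (what is proved, stated in full; the proofs are below) =====
def Claim_equal_px : Prop := ∀ (x : List Int) (samples : List Int), Dom_px x samples → Pre_px x samples → Spec_px x samples (px x samples)

-- ===== LEMMAS AND PROOFS =====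

-- the common specification: y[j] counts the samples falling in bin j
def pxCond (x : List Int) (j : Nat) (s : Int) : Bool :=
  if j = 0 then decide (s ≤ x.getD 0 0)
  else decide (s ≤ x.getD j 0 ∧ x.getD (j - 1) 0 < s)

def pxSpecL (x samples : List Int) : List Int :=
  (List.range x.length).map (fun j => (samples.countP (pxCond x j) : Int))

lemma pxInc_length (y : List Int) (i : Nat) : (pxInc y i).length = y.length := by
  simp [pxInc]

lemma pxInc_getD (y : List Int) (i j : Nat) (hi : i < y.length) :
    (pxInc y i).getD j 0 = if j = i then y.getD j 0 + 1 else y.getD j 0 := by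
  rcases eq_or_ne j i with rfl | h
  · simp [pxInc, List.getD_eq_getElem?_getD, hi]
  · simp [pxInc, List.getD_eq_getElem?_getD, h, Ne.symm h]

lemma inner_length (x : List Int) (s : Int) (L : List (Int × Int)) (y : List Int) :
    (L.foldl (fun y2 iv =>
        if s ≤ iv.2 ∧ PySem.List.pyGetD x iv.1 0 < s
        then pxInc y2 (iv.1.toNat + 1) else y2) y).length = y.length := by
  induction L generalizing y with
  | nil => rfl
  | cons iv L ih => simp only [List.foldl_cons]; split <;> simp [ih, pxInc_length]

lemma inner_getD (x : List Int) (s : Int) (L : List (Int × Int)) (y : List Int)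
    (hL : ∀ iv ∈ L, iv.1.toNat + 1 < y.length) (j : Nat) :
    (L.foldl (fun y2 iv =>
        if s ≤ iv.2 ∧ PySem.List.pyGetD x iv.1 0 < s
        then pxInc y2 (iv.1.toNat + 1) else y2) y).getD j 0
    = y.getD j 0 +
      (L.countP (fun iv => decide (iv.1.toNat + 1 = j ∧ s ≤ iv.2 ∧ PySem.List.pyGetD x iv.1 0 < s)) : Int) := by
  induction L generalizing y with
  | nil => simp
  | cons iv L ih =>
    simp only [List.foldl_cons, List.countP_cons]
    have hmem : iv.1.toNat + 1 < y.length := hL iv List.mem_cons_self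
    by_cases hP : s ≤ iv.2 ∧ PySem.List.pyGetD x iv.1 0 < s
    · rw [if_pos hP,
        ih (pxInc y (iv.1.toNat + 1))
          (fun p hp => by rw [pxInc_length]; exact hL p (List.mem_cons_of_mem _ hp)),
        pxInc_getD y (iv.1.toNat + 1) j hmem]
      by_cases hj : iv.1.toNat + 1 = j
      · rw [if_pos hj.symm, if_pos (decide_eq_true (show iv.1.toNat + 1 = j ∧ s ≤ iv.2 ∧ PySem.List.pyGetD x iv.1 0 < s from ⟨hj, hP⟩))]
        push_cast
        ring
      · rw [if_neg (fun h => hj h.symm),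
          if_neg (show ¬(decide (iv.1.toNat + 1 = j ∧ s ≤ iv.2 ∧ PySem.List.pyGetD x iv.1 0 < s) = true)
            from fun h => hj (of_decide_eq_true h).1)]
        simp
    · rw [if_neg hP, ih y (fun p hp => hL p (List.mem_cons_of_mem _ hp))]
      simp [hP]

lemma countP_range_eq (n j : Nat) (R : Nat → Prop) [DecidablePred R] :
    ((List.range n).countP (fun k => decide (k + 1 = j ∧ R k)) : Int)
    = if 1 ≤ j ∧ j - 1 < n ∧ R (j - 1) then 1 else 0 := by
  induction n with
  | zero => rw [if_neg (fun h => by have := h.2.1; omega)]; simp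
  | succ n ih =>
    rw [List.range_succ, List.countP_append, List.countP_singleton, Nat.cast_add, ih]
    by_cases hj : n + 1 = j
    · by_cases hR : R n
      · rw [if_neg (show ¬(1 ≤ j ∧ j - 1 < n ∧ R (j - 1)) from fun h => by have := h.2.1; omega),
          if_pos (show 1 ≤ j ∧ j - 1 < n + 1 ∧ R (j - 1) from
            ⟨by omega, by omega, by rwa [show j - 1 = n from by omega]⟩),
          if_pos (decide_eq_true (show n + 1 = j ∧ R n from ⟨hj, hR⟩))]
        norm_num
      · rw [if_neg (show ¬(1 ≤ j ∧ j - 1 < n ∧ R (j - 1)) from fun h => by have := h.2.1; omega),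
          if_neg (show ¬(1 ≤ j ∧ j - 1 < n + 1 ∧ R (j - 1)) from
            fun h => hR (by have := h.2.2; rwa [show j - 1 = n from by omega] at this)),
          if_neg (show ¬(decide (n + 1 = j ∧ R n) = true) from fun h => hR (of_decide_eq_true h).2)]
        norm_num
    · by_cases hfin : 1 ≤ j ∧ j - 1 < n ∧ R (j - 1)
      · rw [if_pos hfin,
          if_pos (show 1 ≤ j ∧ j - 1 < n + 1 ∧ R (j - 1) from ⟨hfin.1, by have := hfin.2.1; omega, hfin.2.2⟩),
          if_neg (show ¬(decide (n + 1 = j ∧ R n) = true) from fun h => hj (of_decide_eq_true h).1)]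
        norm_num
      · rw [if_neg hfin,
          if_neg (show ¬(1 ≤ j ∧ j - 1 < n + 1 ∧ R (j - 1)) from fun h => hfin ⟨h.1, by have := h.2.1; omega, h.2.2⟩),
          if_neg (show ¬(decide (n + 1 = j ∧ R n) = true) from fun h => hj (of_decide_eq_true h).1)]
        norm_num

-- the effect of one sample on slot j
lemma step_getD (x : List Int) (s : Int) (y : List Int) (hy : y.length = x.length)
    (j : Nat) (hj : j < x.length) :
    ((PySem.List.enumerate (x.drop 1)).foldl
      (fun y2 iv =>
        if s ≤ iv.2 ∧ PySem.List.pyGetD x iv.1 0 < s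
        then pxInc y2 (iv.1.toNat + 1) else y2)
      (if s ≤ PySem.List.pyGetD x 0 0 then pxInc y 0 else y)).getD j 0
    = y.getD j 0 + (if pxCond x j s then 1 else 0) := by
  have hxpos : 0 < x.length := by omega
  have hlen1 : (if s ≤ PySem.List.pyGetD x 0 0 then pxInc y 0 else y).length = y.length := by
    split <;> simp [pxInc_length]
  rw [inner_getD]
  · -- compute the countP over the enumerate list
    rw [PySem.List.enumerate_eq_map_pyRange (x.drop 1) 0, List.countP_map,
      PySem.List.pyRange_one]
    simp only [PySem.List.len_eq, sub_zero, Int.toNat_natCast, List.countP_map,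
      Function.comp_def, zero_add]
    -- re-state the goal so every decidability instance is freshly elaborated
    show (if s ≤ PySem.List.pyGetD x 0 0 then pxInc y 0 else y).getD j 0 +
        ((List.range (List.drop 1 x).length).countP
          (fun k => decide (k + 1 = j ∧ s ≤ PySem.List.pyGetD (List.drop 1 x) (k : Int) 0 ∧
                    PySem.List.pyGetD x (k : Int) 0 < s)) : Int)
      = y.getD j 0 + (if pxCond x j s then 1 else 0)
    have hcnt : ((List.range (List.drop 1 x).length).countP
          (fun k => decide (k + 1 = j ∧ s ≤ PySem.List.pyGetD (List.drop 1 x) (k : Int) 0 ∧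
                    PySem.List.pyGetD x (k : Int) 0 < s)) : Int)
        = if 1 ≤ j ∧ j - 1 < (List.drop 1 x).length ∧
             (s ≤ PySem.List.pyGetD (List.drop 1 x) ((j - 1 : Nat) : Int) 0 ∧
              PySem.List.pyGetD x ((j - 1 : Nat) : Int) 0 < s) then 1 else 0 :=
      countP_range_eq (List.drop 1 x).length j
        (fun k => s ≤ PySem.List.pyGetD (List.drop 1 x) (k : Int) 0 ∧
                  PySem.List.pyGetD x (k : Int) 0 < s)
    rw [hcnt]
    simp only [List.length_drop]
    by_cases hj0 : j = 0
    · subst hj0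
      rw [if_neg (show ¬(1 ≤ 0 ∧ 0 - 1 < x.length - 1 ∧
          (s ≤ PySem.List.pyGetD (List.drop 1 x) ((0 - 1 : Nat) : Int) 0 ∧
           PySem.List.pyGetD x ((0 - 1 : Nat) : Int) 0 < s)) from fun h => by have := h.1; omega)]
      split
      · next hs0 =>
        rw [pxInc_getD y 0 0 (by omega),
          if_pos (show pxCond x 0 s = true from by
            simp only [pxCond]
            exact decide_eq_true (by rwa [PySem.List.pyGetD_zero] at hs0)),
          if_pos rfl]
        ring
      · next hs0 =>
        rw [if_neg (show ¬(pxCond x 0 s = true) from by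
            simp only [pxCond]
            exact fun h => hs0 (by rw [PySem.List.pyGetD_zero]; exact of_decide_eq_true h))]
    · have h1 : j - 1 < (x.drop 1).length := by simp only [List.length_drop]; omega
      have hdrop : x.getD j 0 = PySem.List.pyGetD (x.drop 1) ((j - 1 : Nat) : Int) 0 := by
        rw [PySem.List.pyGetD_natCast]
        rw [List.getD_eq_getElem _ _ (by omega), List.getD_eq_getElem _ _ h1]
        rw [List.getElem_drop]
        congr 1
        omega
      have hget2 : PySem.List.pyGetD x ((j - 1 : Nat) : Int) 0 = x.getD (j - 1) 0 :=
        PySem.List.pyGetD_natCast x (j - 1) 0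
      have houter : (if s ≤ PySem.List.pyGetD x 0 0 then pxInc y 0 else y).getD j 0 = y.getD j 0 := by
        split
        · rw [pxInc_getD y 0 j (by omega), if_neg hj0]
        · rfl
      rw [houter]
      congr 1
      have hC : (1 ≤ j ∧ j - 1 < x.length - 1 ∧
          (s ≤ PySem.List.pyGetD (List.drop 1 x) ((j - 1 : Nat) : Int) 0 ∧
           PySem.List.pyGetD x ((j - 1 : Nat) : Int) 0 < s))
          ↔ (s ≤ x.getD j 0 ∧ x.getD (j - 1) 0 < s) := by
        rw [← hdrop, hget2]
        constructor
        · rintro ⟨-, -, h⟩; exact h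
        · intro h; exact ⟨by omega, by omega, h⟩
      by_cases hcond : s ≤ x.getD j 0 ∧ x.getD (j - 1) 0 < s
      · rw [if_pos (hC.mpr hcond),
          if_pos (show pxCond x j s = true from by
            simp only [pxCond, if_neg hj0]
            exact decide_eq_true hcond)]
      · rw [if_neg (fun h => hcond (hC.mp h)),
          if_neg (show ¬(pxCond x j s = true) from by
            simp only [pxCond, if_neg hj0]
            exact fun h => hcond (of_decide_eq_true h))]
  · intro iv hiv
    rw [PySem.List.mem_enumerate_iff] at hiv
    obtain ⟨k, hk, rfl⟩ := hiv
    simp only [zero_add, Int.toNat_natCast]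
    rw [hlen1, hy]
    simp only [List.length_drop] at hk
    omega

lemma step_length (x : List Int) (s : Int) (y : List Int) :
    ((PySem.List.enumerate (x.drop 1)).foldl
      (fun y2 iv =>
        if s ≤ iv.2 ∧ PySem.List.pyGetD x iv.1 0 < s
        then pxInc y2 (iv.1.toNat + 1) else y2)
      (if s ≤ PySem.List.pyGetD x 0 0 then pxInc y 0 else y)).length = y.length := by
  rw [inner_length]; split <;> simp [pxInc_length]

lemma fold_getD (x : List Int) (samples : List Int) (y : List Int)
    (hy : y.length = x.length) (j : Nat) (hj : j < x.length) :
    (samples.foldl (fun y sample =>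
      let y1 := if sample ≤ PySem.List.pyGetD x 0 0 then pxInc y 0 else y
      (PySem.List.enumerate (x.drop 1)).foldl
        (fun y2 iv =>
          if sample ≤ iv.2 ∧ PySem.List.pyGetD x iv.1 0 < sample
          then pxInc y2 (iv.1.toNat + 1) else y2) y1) y).getD j 0
    = y.getD j 0 + (samples.countP (pxCond x j) : Int) := by
  induction samples generalizing y with
  | nil => simp
  | cons s rest ih =>
      simp only [List.foldl_cons]
      rw [ih _ (by rw [step_length]; exact hy)]
      rw [step_getD x s y hy j hj, List.countP_cons]
      push_cast
      split <;> simp <;> ring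
  
lemma fold_length (x : List Int) (samples : List Int) (y : List Int) :
    (samples.foldl (fun y sample =>
      let y1 := if sample ≤ PySem.List.pyGetD x 0 0 then pxInc y 0 else y
      (PySem.List.enumerate (x.drop 1)).foldl
        (fun y2 iv =>
          if sample ≤ iv.2 ∧ PySem.List.pyGetD x iv.1 0 < sample
          then pxInc y2 (iv.1.toNat + 1) else y2) y1) y).length = y.length := by
  induction samples generalizing y with
  | nil => rfl
  | cons s rest ih => simp only [List.foldl_cons]; rw [ih, step_length]

lemma px_eq_spec (x samples : List Int) : px x samples = pxSpecL x samples := by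
  unfold px pxSpecL
  apply List.ext_getElem
  · rw [fold_length]; simp
  · intro j h1 h2
    have hj : j < x.length := by simpa using h2
    have hlen := fold_length x samples (List.replicate x.length 0)
    have hD := fold_getD x samples (List.replicate x.length 0) (by simp) j hj
    rw [List.getD_eq_getElem _ _ (by rw [hlen]; simpa using hj)] at hD
    rw [hD]
    simp [hj]

-- ===== B side =====

lemma countP_threshold (a : List Int) (p : Int → Bool) (r : Nat) (hr : r ≤ a.length)
    (h : ∀ j (hj : j < a.length), p a[j] = true ↔ j < r) : a.countP p = r := by
  induction a generalizing r with
  | nil => simp at hr ⊢; omega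
  | cons hd t ih =>
    rcases r with _ | r
    · rw [List.countP_eq_zero.mpr]
      intro b hb
      rw [List.mem_iff_getElem] at hb
      obtain ⟨i, hi, rfl⟩ := hb
      simpa using (h i hi)
    · rw [List.countP_cons, ih r (by simpa using hr)
        (fun j hj => by simpa [Nat.succ_lt_succ_iff] using h (j + 1) (by simpa using hj))]
      have h0 : p hd = true := (h 0 (by simp)).mpr (by omega)
      simp [h0]

lemma br_count (ss : List Int) (v : Int) (hs : ss.Pairwise (· ≤ ·)) :
    (PySem.List.bisectRight ss v : Int) = (ss.countP (fun s => decide (s ≤ v)) : Int) := by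
  obtain ⟨h1, h2, h3⟩ := PySem.List.bisectRight_spec ss v hs
  rw [countP_threshold ss _ _ h1]
  intro j hj
  simp only [decide_eq_true_iff]
  constructor
  · intro hle
    by_contra hge
    exact absurd hle (not_le.mpr (h3 j hj (by omega)))
  · exact h2 j hj

lemma countP_band (samples : List Int) (a b : Int) :
    (samples.countP (fun s => decide (s ≤ b ∧ a < s)) : Int)
    = (samples.countP (fun s => decide (s ≤ b)) : Int)
      - (samples.countP (fun s => decide (s ≤ (if a < b then a else b))) : Int) := by
  induction samples with
  | nil => simp
  | cons s t ih =>
    simp only [List.countP_cons]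
    have hca : ∀ (m : Nat) (c : Bool),
        ((m + if c = true then 1 else 0 : Nat) : Int) = (m : Int) + (if c = true then (1:Int) else 0) := by
      intro m c; cases c <;> simp
    rw [hca, hca, hca, ih]
    simp only [decide_eq_true_eq]
    split_ifs <;> omega

-- the value appended for index j in B's loop (proof-side name for the loop body)
def pxAltVal (x ss : List Int) (j : Int) : Int :=
  if j = 0 then (PySem.List.bisectRight ss (PySem.List.pyGetD x 0 0) : Int)
  else (PySem.List.bisectRight ss (PySem.List.pyGetD x j 0) : Int)
       - (PySem.List.bisectRight ss
           (if PySem.List.pyGetD x (j - 1) 0 < PySem.List.pyGetD x j 0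
            then PySem.List.pyGetD x (j - 1) 0 else PySem.List.pyGetD x j 0) : Int)

lemma px_alt_eq_map (x samples : List Int) :
    px_alt x samples
    = (PySem.List.pyRange 0 x.length 1).map
        (pxAltVal x (PySem.List.sorted samples (fun s => s) false)) := by
  unfold px_alt
  rw [PySem.List.foldl_congr_mem _ _
    (fun y j => y ++ [pxAltVal x (PySem.List.sorted samples (fun s => s) false) j]) []
    (by intro acc j _; by_cases h : j = 0 <;> simp [pxAltVal, h])]
  exact PySem.List.foldl_append_singleton_eq_map _ _ []

lemma pxAltVal_eq (x samples : List Int) (j : Nat) :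
    pxAltVal x (PySem.List.sorted samples (fun s => s) false) (j : Int)
    = (samples.countP (pxCond x j) : Int) := by
  have hpair : (PySem.List.sorted samples (fun s => s) false).Pairwise (fun a b => a ≤ b) :=
    PySem.List.sorted_pairwise samples (fun s => s)
  have hperm : (PySem.List.sorted samples (fun s => s) false).Perm samples :=
    PySem.List.sorted_perm samples (fun s => s) false
  by_cases hj : j = 0
  · subst hj
    have hc : pxCond x 0 = fun s => decide (s ≤ x.getD 0 0) := by
      funext s; simp [pxCond]
    unfold pxAltVal
    rw [if_pos (by norm_num), hc, PySem.List.pyGetD_zero, br_count _ _ hpair, hperm.countP_eq]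
  · have hc : pxCond x j = fun s => decide (s ≤ x.getD j 0 ∧ x.getD (j - 1) 0 < s) := by
      funext s; simp [pxCond, hj]
    unfold pxAltVal
    rw [if_neg (by exact_mod_cast hj), hc,
      show ((j : Int) - 1) = ((j - 1 : Nat) : Int) from by omega]
    simp only [PySem.List.pyGetD_natCast]
    rw [countP_band samples (x.getD (j - 1) 0) (x.getD j 0),
      br_count _ _ hpair, br_count _ _ hpair, hperm.countP_eq, hperm.countP_eq]

lemma px_alt_eq_spec (x samples : List Int) : px_alt x samples = pxSpecL x samples := by
  rw [px_alt_eq_map]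
  unfold pxSpecL
  rw [PySem.List.pyRange_one]
  simp only [sub_zero, Int.toNat_natCast, List.map_map]
  apply List.map_congr_left
  intro j _
  simp only [Function.comp_def, zero_add]
  exact pxAltVal_eq x samples j

-- ===== VERDICT (by name: the statement is the Claim_ definition above) =====
theorem px_spec : Claim_equal_px := by
  intro x samples _ _
  unfold Spec_px
  rw [px_eq_spec, px_alt_eq_spec]
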